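-- pv_equiv track=rewrite | github.com/SC-Edwin/ds-super-crema | modules/upload_automation/platforms/unity/unity_ads.py | _unity_count_valid_video_pairs
-- ===== SOURCE A (Python) =====
-- from typing import Dict, List, Any, Callable
--
-- def _unity_filter_video_files_for_pack(videos: List[Dict[str, Any]]) -> List[Dict[str, Any]]:
--     """Marketer/uni.py와 동일: mp4 비디오만 (playable/html 제외)."""
--     return [
--         v
--         for v in (videos or [])
--         if not (
--             "playable" in (v.get("name") or "").lower()
--             or (v.get("name") or "").lower().endswith(".html")
--         )
--         and (v.get("name") or "").lower().endswith(".mp4")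
--     ]
--
-- def _unity_count_valid_video_pairs(videos: List[Dict[str, Any]]) -> int:
--     """세로+가로 쌍이 맞는 주제 수 (upload_unity_creatives_to_campaign과 동일 규칙)."""
--     video_files = _unity_filter_video_files_for_pack(videos)
--     subjects: dict[str, list[dict]] = {}
--     for v in video_files:
--         base = (v.get("name") or "").split("_")[0]
--         subjects.setdefault(base, []).append(v)
--     n = 0
--     for items in subjects.values():
--         portrait = next((x for x in items if "1080x1920" in (x.get("name") or "")), None)
--         landscape = next((x for x in items if "1920x1080" in (x.get("name") or "")), None)
--         if portrait and landscape:
--             n += 1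
--     return n
-- ===== SOURCE B (Python) =====
-- from typing import Dict, List, Any
--
-- def _unity_filter_video_files_for_pack(videos: List[Dict[str, Any]]) -> List[Dict[str, Any]]:
--     return [
--         v
--         for v in (videos or [])
--         if not (
--             "playable" in (v.get("name") or "").lower()
--             or (v.get("name") or "").lower().endswith(".html")
--         )
--         and (v.get("name") or "").lower().endswith(".mp4")
--     ]
--
-- def _unity_count_valid_video_pairs(videos: List[Dict[str, Any]]) -> int:
--     """One pass: collect subjects seen in portrait and in landscape, intersect."""
--     portrait_subjects = set()
--     landscape_subjects = set()
--     for v in _unity_filter_video_files_for_pack(videos):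
--         name = v.get("name") or ""
--         base = name.split("_")[0]
--         if "1080x1920" in name:
--             portrait_subjects.add(base)
--         if "1920x1080" in name:
--             landscape_subjects.add(base)
--     return len(portrait_subjects & landscape_subjects)
-- ===== Notes on version B (the rewrite author's own statement) =====
-- stated objective: simpler
-- what changed: Replaces the dict-of-lists grouping plus per-subject next() scans with a single pass that records each subject in a portrait set and/or a landscape set and returns the size of their intersection.
import Mathlib
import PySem

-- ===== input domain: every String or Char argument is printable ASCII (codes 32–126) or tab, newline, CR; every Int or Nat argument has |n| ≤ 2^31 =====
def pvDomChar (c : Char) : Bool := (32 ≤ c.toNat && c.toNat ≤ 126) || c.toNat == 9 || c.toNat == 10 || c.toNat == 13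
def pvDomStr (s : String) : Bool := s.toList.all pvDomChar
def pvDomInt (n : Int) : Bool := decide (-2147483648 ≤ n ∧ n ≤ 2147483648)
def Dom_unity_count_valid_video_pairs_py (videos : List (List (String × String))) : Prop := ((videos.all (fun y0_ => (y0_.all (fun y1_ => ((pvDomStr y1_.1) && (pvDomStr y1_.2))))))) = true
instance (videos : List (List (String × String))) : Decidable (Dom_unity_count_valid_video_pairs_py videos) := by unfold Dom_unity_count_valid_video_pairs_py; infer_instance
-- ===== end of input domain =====

-- B replaces A's dict-of-lists grouping plus per-subject next() scans by a single pass that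
-- collects a portrait-subject set and a landscape-subject set and counts their intersection
-- (objective: simpler; same asymptotic cost).

-- ===== PORT A =====
-- (v.get("name") or "") : a video dict is an association list, lookup is the first match;
-- a missing key gives None and "or" turns it (and only falsy values, i.e. "") into "".
def pvName (v : List (String × String)) : String :=
  ((PySem.Dict.mk v).get? "name").getD ""

-- _unity_filter_video_files_for_pack, shared verbatim by the Python A and B
def pvFilterVideos (videos : List (List (String × String))) : List (List (String × String)) :=
  videos.filter (fun v =>
    !(PySem.Str.isIn "playable" (PySem.Str.lower (pvName v))
        || PySem.Str.endswith (PySem.Str.lower (pvName v)) ".html")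
      && PySem.Str.endswith (PySem.Str.lower (pvName v)) ".mp4")

-- (name).split("_")[0]: split with a nonempty separator always yields a nonempty list,
-- so the [0] indexing is total (neither getD branch can fire)
def pvBase (v : List (String × String)) : String :=
  ((PySem.Str.split? (pvName v) "_").getD []).headD ""

-- Python truthiness of "portrait"/"landscape": None is falsy, a dict is truthy iff nonempty
def pvTruthy (o : Option (List (String × String))) : Bool :=
  match o with
  | none => false
  | some x => !x.isEmpty

def unity_count_valid_video_pairs_py (videos : List (List (String × String))) : Int :=
  let video_files := pvFilterVideos videos
  let subjects : PySem.Dict String (List (List (String × String))) :=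
    video_files.foldl (fun d v => d.modify (pvBase v) [] (fun xs => xs ++ [v])) PySem.Dict.empty
  subjects.values.foldl (fun n items =>
    let portrait := items.find? (fun x => PySem.Str.isIn "1080x1920" (pvName x))
    let landscape := items.find? (fun x => PySem.Str.isIn "1920x1080" (pvName x))
    if pvTruthy portrait && pvTruthy landscape then n + 1 else n) 0

-- ===== PORT B =====
def unity_count_valid_video_pairs_py_alt (videos : List (List (String × String))) : Int :=
  let sets :=
    (pvFilterVideos videos).foldl
      (fun (pl : PySem.Set String × PySem.Set String) v =>
        let name := pvName v
        let base := ((PySem.Str.split? name "_").getD []).headD ""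
        (if PySem.Str.isIn "1080x1920" name then pl.1.add base else pl.1,
         if PySem.Str.isIn "1920x1080" name then pl.2.add base else pl.2))
      (PySem.Set.empty, PySem.Set.empty)
  PySem.Set.len (sets.1.inter sets.2)

-- ===== PRECONDITION & SPEC =====
def Spec_unity_count_valid_video_pairs_py (videos : List (List (String × String))) (out : Int) : Prop := out = unity_count_valid_video_pairs_py_alt videos
instance (videos : List (List (String × String))) (out : Int) : Decidable (Spec_unity_count_valid_video_pairs_py videos out) := by unfold Spec_unity_count_valid_video_pairs_py; infer_instance

-- ===== CLAIM (what is proved, stated in full; the proofs are below) =====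
def Claim_equal_unity_count_valid_video_pairs_py : Prop := ∀ (videos : List (List (String × String))), Dom_unity_count_valid_video_pairs_py videos → Spec_unity_count_valid_video_pairs_py videos (unity_count_valid_video_pairs_py videos)

-- ===== LEMMAS AND PROOFS =====

-- the two substring tests, named for the proofs
def pvP (x : List (String × String)) : Bool := PySem.Str.isIn "1080x1920" (pvName x)
def pvL (x : List (String × String)) : Bool := PySem.Str.isIn "1920x1080" (pvName x)

-- every dict that survives the filter is nonempty (its lowered name ends in ".mp4")
theorem pvFilter_ne_nil (videos : List (List (String × String))) :
    ∀ x ∈ pvFilterVideos videos, x ≠ [] := by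
  intro x hx hx0
  subst hx0
  rcases List.mem_filter.mp hx with ⟨_, hc⟩
  exact absurd hc (by decide)

-- Python truthiness of next(...) over a list of nonempty dicts is plain existence
theorem pvTruthy_find? (l : List (List (String × String))) (p : List (String × String) → Bool)
    (h : ∀ x ∈ l, x ≠ []) : pvTruthy (l.find? p) = l.any p := by
  cases hf : l.find? p with
  | none =>
      have ha : l.any p = false := by
        simp only [List.any_eq_false]
        exact List.find?_eq_none.mp hf
      simp [pvTruthy, ha]
  | some x =>
      have hmem := List.mem_of_find?_eq_some hf
      have hpx := List.find?_some hf
      have hne := h x hmem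
      simp only [pvTruthy]
      rw [List.isEmpty_eq_false_iff.mpr hne]
      exact (List.any_eq_true.mpr ⟨x, hmem, hpx⟩).symm

-- A's grouping dict: its group at key c is the in-order sublist of items with base c
theorem pvGroupA (fs : List (List (String × String))) (c : String) :
    ((fs.foldl (fun d v => d.modify (pvBase v) [] (fun xs => xs ++ [v])) PySem.Dict.empty).getD c [])
      = fs.filter (fun v => pvBase v == c) := by
  have h : fs.foldl (fun d v => d.modify (pvBase v) [] (fun xs => xs ++ [v])) PySem.Dict.empty
      = (fs.map (fun v => (pvBase v, v))).foldl
          (fun d p => d.modify p.1 [] (fun xs => xs ++ [p.2])) PySem.Dict.empty := by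
    rw [List.foldl_map]
  rw [h, PySem.Dict.getD_foldl_modify_append, List.filter_map]
  simp [Function.comp_def]

-- A's grouping dict: its keys are the distinct bases in first-occurrence order
theorem pvKeysA (fs : List (List (String × String))) :
    ((fs.foldl (fun d v => d.modify (pvBase v) [] (fun xs => xs ++ [v]))
        (PySem.Dict.empty : PySem.Dict String (List (List (String × String))))).keys)
      = PySem.Set.ofList (fs.map pvBase) := by
  rw [PySem.Dict.keys_foldl_modify_key fs pvBase [] (fun _ v xs => xs ++ [v]) PySem.Dict.empty]
  rw [PySem.Dict.keys_empty, PySem.Set.update_nil_left]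

-- A computes the number of distinct bases that have both a portrait and a landscape item
theorem pvA_eq_countP (videos : List (List (String × String))) :
    unity_count_valid_video_pairs_py videos
      = ((PySem.Set.ofList ((pvFilterVideos videos).map pvBase)).countP
          (fun k => ((pvFilterVideos videos).any fun x => (pvBase x == k) && pvP x)
                 && ((pvFilterVideos videos).any fun x => (pvBase x == k) && pvL x)) : Int) := by
  set fs := pvFilterVideos videos with hfs
  have hnodup : ((fs.foldl (fun d v => d.modify (pvBase v) [] (fun xs => xs ++ [v]))
      (PySem.Dict.empty : PySem.Dict String (List (List (String × String))))).keys).Nodup := by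
    exact PySem.Dict.nodup_keys_foldl_modify_key fs pvBase [] (fun _ v xs => xs ++ [v])
      PySem.Dict.empty PySem.Dict.nodup_keys_empty
  simp only [unity_count_valid_video_pairs_py, ← hfs]
  rw [PySem.Dict.values_eq_map_keys _ hnodup []]
  rw [List.foldl_map, pvKeysA]
  have hgroups : ∀ (n : Int) (k : String),
      (fun n k =>
        let portrait := ((fs.foldl (fun d v => d.modify (pvBase v) [] (fun xs => xs ++ [v]))
            PySem.Dict.empty).getD k []).find? (fun x => PySem.Str.isIn "1080x1920" (pvName x))
        let landscape := ((fs.foldl (fun d v => d.modify (pvBase v) [] (fun xs => xs ++ [v]))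
            PySem.Dict.empty).getD k []).find? (fun x => PySem.Str.isIn "1920x1080" (pvName x))
        if pvTruthy portrait && pvTruthy landscape then n + 1 else n) n k
      = (fun n k => if ((fs.any fun x => (pvBase x == k) && pvP x)
                    && ((fs.any fun x => (pvBase x == k) && pvL x))) then n + 1 else n) n k := by
    intro n k
    simp only [pvGroupA]
    have hne : ∀ x ∈ fs.filter (fun v => pvBase v == k), x ≠ [] := by
      intro x hx
      exact pvFilter_ne_nil videos x (List.mem_filter.mp hx).1
    rw [pvTruthy_find? _ _ hne, pvTruthy_find? _ _ hne, List.any_filter, List.any_filter]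
    rfl
  rw [funext fun n => funext fun k => hgroups n k]
  rw [PySem.List.foldl_count_if]
  simp

-- inline forms in B's port, named for the proofs
theorem pvBase_def (v : List (String × String)) :
    ((PySem.Str.split? (pvName v) "_").getD []).headD "" = pvBase v := rfl
theorem pvP_def (v : List (String × String)) :
    PySem.Str.isIn "1080x1920" (pvName v) = pvP v := rfl
theorem pvL_def (v : List (String × String)) :
    PySem.Str.isIn "1920x1080" (pvName v) = pvL v := rfl

-- B's paired fold splits into two independent set folds
theorem pvB_split (fs : List (List (String × String))) (s t : PySem.Set String) :
    fs.foldl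
      (fun (pl : PySem.Set String × PySem.Set String) v =>
        (if pvP v then pl.1.add (pvBase v) else pl.1,
         if pvL v then pl.2.add (pvBase v) else pl.2)) (s, t)
    = (fs.foldl (fun s v => if pvP v then s.add (pvBase v) else s) s,
       fs.foldl (fun t v => if pvL v then t.add (pvBase v) else t) t) := by
  induction fs generalizing s t with
  | nil => rfl
  | cons v fs ih =>
      simp only [List.foldl_cons]
      rw [ih]

-- a conditional add-fold is the plain add-fold over the filtered list, i.e. an ordered dedup
theorem pvCondFold (p : List (String × String) → Bool)
    (fs : List (List (String × String))) (s : PySem.Set String) :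
    fs.foldl (fun s v => if p v then s.add (pvBase v) else s) s
      = PySem.Set.update s ((fs.filter p).map pvBase) := by
  rw [PySem.Set.update_map_eq_foldl_add]
  induction fs generalizing s with
  | nil => rfl
  | cons v fs ih =>
      simp only [List.foldl_cons, List.filter_cons]
      by_cases hp : p v = true
      · rw [if_pos hp, if_pos hp]
        simp only [List.foldl_cons]
        exact ih _
      · rw [if_neg hp, if_neg hp]
        exact ih _

-- the two counts agree: both count the distinct bases having a portrait and a landscape item
theorem pvAB (videos : List (List (String × String))) :
    unity_count_valid_video_pairs_py videos = unity_count_valid_video_pairs_py_alt videos := by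
  rw [pvA_eq_countP]
  simp only [unity_count_valid_video_pairs_py_alt, pvBase_def, pvP_def, pvL_def]
  rw [pvB_split, pvCondFold, pvCondFold]
  set fs := pvFilterVideos videos with hfs
  set PS := PySem.Set.update PySem.Set.empty ((fs.filter pvP).map pvBase) with hPS
  set LS := PySem.Set.update PySem.Set.empty ((fs.filter pvL).map pvBase) with hLS
  have hPSof : PS = PySem.Set.ofList ((fs.filter pvP).map pvBase) := by
    rw [hPS]; exact PySem.Set.update_nil_left _
  have hLSof : LS = PySem.Set.ofList ((fs.filter pvL).map pvBase) := by
    rw [hLS]; exact PySem.Set.update_nil_left _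
  have hnP : PS.Nodup := by rw [hPSof]; exact PySem.Set.nodup_ofList _
  have hperm :
      ((PySem.Set.ofList (fs.map pvBase)).filter
        (fun k => (fs.any fun x => (pvBase x == k) && pvP x)
               && (fs.any fun x => (pvBase x == k) && pvL x))).Perm (PS.inter LS) := by
    rw [List.perm_ext_iff_of_nodup
      (List.Nodup.filter _ (PySem.Set.nodup_ofList _)) (PySem.Set.nodup_inter _ _ hnP)]
    intro b
    rw [List.mem_filter, PySem.Set.mem_inter, hPSof, hLSof,
        PySem.Set.mem_ofList, PySem.Set.mem_ofList, PySem.Set.mem_ofList]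
    simp only [List.mem_map, List.mem_filter, List.any_eq_true, Bool.and_eq_true, beq_iff_eq]
    constructor
    · rintro ⟨-, ⟨x, hx, hbx, hpx⟩, ⟨y, hy, hby, hly⟩⟩
      exact ⟨⟨x, ⟨hx, hpx⟩, hbx⟩, ⟨y, ⟨hy, hly⟩, hby⟩⟩
    · rintro ⟨⟨x, ⟨hx, hpx⟩, hbx⟩, ⟨y, ⟨hy, hly⟩, hby⟩⟩
      exact ⟨⟨x, hx, hbx⟩, ⟨x, hx, hbx, hpx⟩, ⟨y, hy, hby, hly⟩⟩
  simp only [List.countP_eq_length_filter, PySem.Set.len]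
  rw [hperm.length_eq]

-- ===== VERDICT (by name: the statement is the Claim_ definition above) =====
theorem unity_count_valid_video_pairs_py_spec : Claim_equal_unity_count_valid_video_pairs_py := by
  intro videos _
  exact pvAB videos
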